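-- pv_equiv track=rewrite | github.com/alk-alyss/adventofcode | 2021/day15/test.py | increaseMap
-- ===== SOURCE A (Python) =====
-- def shiftLine(line, n):
--     v = ['1','2','3','4','5','6','7','8','9']
--     return "".join([v[(v.index(i)+n)%9] for i in list(line)])
--
-- def increaseMap(riskmap):
--     newRiskmap = []
--     ylen = len(riskmap)
--     for y in range(ylen * 5):
--         newRiskmap.append(
--             shiftLine(riskmap[y % ylen], y//ylen + 0) +
--             shiftLine(riskmap[y % ylen], y//ylen + 1) +
--             shiftLine(riskmap[y % ylen], y//ylen + 2) +
--             shiftLine(riskmap[y % ylen], y//ylen + 3) +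
--             shiftLine(riskmap[y % ylen], y//ylen + 4)
--             )
--     return newRiskmap
-- ===== SOURCE B (Python) =====
-- def shiftLine(line, n):
--     v = ['1','2','3','4','5','6','7','8','9']
--     return "".join([v[(v.index(i)+n)%9] for i in list(line)])
--
-- def increaseMap(riskmap):
--     wide = ["".join(shiftLine(row, tx) for tx in range(5)) for row in riskmap]
--     return [shiftLine(wr, ty) for ty in range(5) for wr in wide]
-- ===== Notes on version B (the rewrite author's own statement) =====
-- stated objective: alternative
-- what changed: Replaces A's single loop over all 5*len rows (assembling five shifted tiles per output row with modular row indexing and floor division) by a two-phase decomposition: first expand each input row horizontally into a 5-wide row, then produce the output as five vertical shifts of the wide rows; correctness rests on shiftLine composing additively mod 9.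
import Mathlib
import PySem

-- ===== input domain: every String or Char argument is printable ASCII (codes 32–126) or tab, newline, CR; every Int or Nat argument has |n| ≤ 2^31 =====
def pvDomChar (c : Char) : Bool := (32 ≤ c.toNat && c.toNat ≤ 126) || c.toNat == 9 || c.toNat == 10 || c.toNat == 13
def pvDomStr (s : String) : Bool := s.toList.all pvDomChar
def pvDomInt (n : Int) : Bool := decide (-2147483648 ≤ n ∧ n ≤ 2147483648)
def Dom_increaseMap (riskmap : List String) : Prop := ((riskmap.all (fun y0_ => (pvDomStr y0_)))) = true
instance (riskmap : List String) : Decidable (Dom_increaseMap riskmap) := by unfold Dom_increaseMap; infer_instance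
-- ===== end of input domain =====

-- B reorganises A's single 5*len-row loop (five shifted tiles assembled per output row via y%len, y//len)
-- into two phases: horizontal expansion of each row, then five vertical shifts of the wide rows.

-- ===== PORT A =====
-- v = ['1','2','3','4','5','6','7','8','9']
def vlist : List Char := ['1', '2', '3', '4', '5', '6', '7', '8', '9']

-- one element of shiftLine's comprehension: v[(v.index(i)+n)%9].
-- `index?` is none exactly where Python's v.index raises ValueError; such inputs are excluded by
-- Pre_increaseMap, so the `.getD ' '` default is never reached on admitted inputs.
def shiftChar (c : Char) (n : Int) : Char :=
  ((PySem.List.index? vlist c).bind (fun idx =>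
    PySem.List.pyGet? vlist (PySem.Int.mod ((idx : Int) + n) 9))).getD ' '

-- "".join of a list of one-character strings = the char list itself
def shiftLine (line : String) (n : Int) : String :=
  String.ofList (line.toList.map (fun i => shiftChar i n))

-- the row appended in each iteration of A's loop (Python's str `+` ported as list append, exact);
-- riskmap[y % ylen] is re-evaluated for each of the five terms, as in the Python.
def aRow (riskmap : List String) (ylen y : Int) : String :=
  String.ofList (
    (shiftLine ((PySem.List.pyGet? riskmap (PySem.Int.mod y ylen)).getD "") (PySem.Int.floordiv y ylen + 0)).toList ++
    (shiftLine ((PySem.List.pyGet? riskmap (PySem.Int.mod y ylen)).getD "") (PySem.Int.floordiv y ylen + 1)).toList ++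
    (shiftLine ((PySem.List.pyGet? riskmap (PySem.Int.mod y ylen)).getD "") (PySem.Int.floordiv y ylen + 2)).toList ++
    (shiftLine ((PySem.List.pyGet? riskmap (PySem.Int.mod y ylen)).getD "") (PySem.Int.floordiv y ylen + 3)).toList ++
    (shiftLine ((PySem.List.pyGet? riskmap (PySem.Int.mod y ylen)).getD "") (PySem.Int.floordiv y ylen + 4)).toList)

def increaseMap (riskmap : List String) : List String :=
  let ylen : Int := riskmap.length
  (PySem.List.pyRange 0 (ylen * 5) 1).foldl
    (fun newRiskmap y => newRiskmap ++ [aRow riskmap ylen y]) []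

-- ===== PORT B =====
-- Source B defines shiftLine identically to A's; the port above is shared.
-- wide row: "".join(shiftLine(row, tx) for tx in range(5))
def wideRow (row : String) : String :=
  PySem.Str.join "" ((PySem.List.pyRange 0 5 1).map (fun tx => shiftLine row tx))

def increaseMap_alt (riskmap : List String) : List String :=
  let wide := riskmap.map (fun row => wideRow row)
  (PySem.List.pyRange 0 5 1).flatMap (fun ty => wide.map (fun wr => shiftLine wr ty))

-- ===== PRECONDITION & SPEC =====
-- Pre_ excludes inputs containing a character outside '1'..'9': there Python's v.index raises
-- ValueError (in both A and B), so A returns no value.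
def Pre_increaseMap (riskmap : List String) : Prop :=
  riskmap.all (fun s => s.toList.all (fun c => vlist.contains c)) = true
instance (riskmap : List String) : Decidable (Pre_increaseMap riskmap) := by
  unfold Pre_increaseMap; infer_instance

def pvWitness_increaseMap : List String := ["123", "987"]

def Spec_increaseMap (riskmap : List String) (out : List String) : Prop := out = increaseMap_alt riskmap
instance (riskmap : List String) (out : List String) : Decidable (Spec_increaseMap riskmap out) := by
  unfold Spec_increaseMap; infer_instance

-- ===== CLAIM (what is proved, stated in full; the proofs are below) =====
def Claim_equal_increaseMap : Prop := ∀ (riskmap : List String), Dom_increaseMap riskmap → Pre_increaseMap riskmap → Spec_increaseMap riskmap (increaseMap riskmap)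

-- ===== LEMMAS AND PROOFS =====

theorem index?_of_nodup (xs : List Char) (h : xs.Nodup) (j : Nat) (hj : j < xs.length) :
    PySem.List.index? xs xs[j] = some j := by
  rw [PySem.List.index?_eq_idxOf?, List.idxOf?_eq_some_iff]
  exact ⟨hj, rfl, fun i hi => (List.Nodup.getElem_inj_iff h).not.mpr (by omega)⟩

theorem shiftChar_eq {c : Char} {k : Nat} (n : Int)
    (h : PySem.List.index? vlist c = some k) :
    shiftChar c n = vlist[(PySem.Int.mod ((k : Int) + n) 9).toNat]'(by
      have h1 : PySem.Int.mod ((k : Int) + n) 9 < 9 := PySem.Int.mod_lt _ (by norm_num)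
      have h2 : 0 ≤ PySem.Int.mod ((k : Int) + n) 9 := PySem.Int.mod_nonneg _ (by norm_num)
      simp only [vlist, List.length_cons, List.length_nil]
      omega) := by
  have h2 : 0 ≤ PySem.Int.mod ((k : Int) + n) 9 := PySem.Int.mod_nonneg _ (by norm_num)
  have h1 : PySem.Int.mod ((k : Int) + n) 9 < 9 := PySem.Int.mod_lt _ (by norm_num)
  simp only [shiftChar, h, Option.bind_some]
  rw [PySem.List.pyGet?_eq_some_getElem vlist h2 (by simpa [vlist] using h1)]
  rfl

theorem shiftChar_comp {c : Char} (m n : Int) (hc : c ∈ vlist) :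
    shiftChar (shiftChar c m) n = shiftChar c (n + m) := by
  obtain ⟨k, hk⟩ := Option.isSome_iff_exists.mp ((PySem.List.index?_isSome_iff vlist c).mpr hc)
  rw [shiftChar_eq m hk]
  set j : Nat := (PySem.Int.mod ((k : Int) + m) 9).toNat with hj
  have hjlt : j < 9 := by
    have h1 : PySem.Int.mod ((k : Int) + m) 9 < 9 := PySem.Int.mod_lt _ (by norm_num)
    have h2 : 0 ≤ PySem.Int.mod ((k : Int) + m) 9 := PySem.Int.mod_nonneg _ (by norm_num)
    omega
  have hjv' : j < vlist.length := by simp only [vlist, List.length_cons, List.length_nil]; omega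
  rw [shiftChar_eq n (index?_of_nodup vlist (by decide) j hjv'), shiftChar_eq (n + m) hk]
  congr 1
  have e1 : PySem.Int.mod ((k : Int) + m) 9 = ((k : Int) + m) % 9 := PySem.Int.mod_eq_emod_of_pos (by norm_num)
  have e2 : PySem.Int.mod ((j : Int) + n) 9 = ((j : Int) + n) % 9 := PySem.Int.mod_eq_emod_of_pos (by norm_num)
  have e3 : PySem.Int.mod ((k : Int) + (n + m)) 9 = ((k : Int) + (n + m)) % 9 := PySem.Int.mod_eq_emod_of_pos (by norm_num)
  have h2 : 0 ≤ PySem.Int.mod ((k : Int) + m) 9 := PySem.Int.mod_nonneg _ (by norm_num)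
  have hjv : (j : Int) = PySem.Int.mod ((k : Int) + m) 9 := by
    rw [hj]; exact Int.toNat_of_nonneg h2
  omega

theorem toList_shiftLine (s : String) (n : Int) :
    (shiftLine s n).toList = s.toList.map (fun c => shiftChar c n) := by
  simp [shiftLine]

theorem chars_join_nil (l : List (List Char)) : PySem.Chars.join [] l = l.flatten := by
  induction l with
  | nil => rfl
  | cons x xs ih =>
    cases xs with
    | nil => simp [PySem.Chars.join, List.intercalate]
    | cons y ys => simp_all [PySem.Chars.join_cons_cons]

theorem range_five (n : Nat) : List.range (n * 5) =
    (List.range n).map (fun r => 0 * n + r) ++ (List.range n).map (fun r => 1 * n + r) ++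
    (List.range n).map (fun r => 2 * n + r) ++ (List.range n).map (fun r => 3 * n + r) ++
    (List.range n).map (fun r => 4 * n + r) := by
  have h : n * 5 = n + (n + (n + (n + n))) := by ring
  rw [h, List.range_add, List.range_add, List.range_add, List.range_add]
  simp only [List.map_append, List.map_map, List.append_assoc, Function.comp_def]
  refine congrArg₂ (· ++ ·) (by simp) (congrArg₂ (· ++ ·)
    (List.map_congr_left fun r _ => by omega) (congrArg₂ (· ++ ·)
    (List.map_congr_left fun r _ => by omega) (congrArg₂ (· ++ ·)
    (List.map_congr_left fun r _ => by omega)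
    (List.map_congr_left fun r _ => by omega))))

theorem increaseMap_eq_map (riskmap : List String) :
    increaseMap riskmap =
      (PySem.List.pyRange 0 ((riskmap.length : Int) * 5) 1).map
        (aRow riskmap (riskmap.length : Int)) := by
  simp only [increaseMap]
  rw [PySem.List.foldl_append_singleton_eq_map]
  simp

theorem toList_wideRow (row : String) :
    (wideRow row).toList =
      row.toList.map (fun c => shiftChar c 0) ++ (row.toList.map (fun c => shiftChar c 1) ++
      (row.toList.map (fun c => shiftChar c 2) ++ (row.toList.map (fun c => shiftChar c 3) ++
      (row.toList.map (fun c => shiftChar c 4) ++ [])))) := by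
  have h5 : PySem.List.pyRange 0 5 1 = [0, 1, 2, 3, 4] := by decide
  simp only [wideRow, h5, List.map_cons, List.map_nil]
  rw [PySem.Str.toList_join]
  simp [chars_join_nil, toList_shiftLine]

theorem block_eq (riskmap : List String) (hpre : ∀ s ∈ riskmap, ∀ c ∈ s.toList, c ∈ vlist)
    (hn : 0 < riskmap.length) (t : Nat) :
    (List.range riskmap.length).map
        (fun r => aRow riskmap (riskmap.length : Int) ((t * riskmap.length + r : Nat) : Int)) =
      (riskmap.map (fun row => wideRow row)).map (fun wr => shiftLine wr (t : Int)) := by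
  apply List.ext_getElem
  · simp
  intro r h1 h2
  simp only [List.getElem_map, List.getElem_range]
  have hr : r < riskmap.length := by simpa using h1
  have hmod : (t * riskmap.length + r) % riskmap.length = r := by
    rw [Nat.mul_comm t riskmap.length, Nat.mul_add_mod, Nat.mod_eq_of_lt hr]
  have hdiv : (t * riskmap.length + r) / riskmap.length = t := by
    rw [Nat.mul_comm t riskmap.length, Nat.mul_add_div hn, Nat.div_eq_of_lt hr, Nat.add_zero]
  have hget : PySem.List.pyGet? riskmap ((r : Nat) : Int) = some (riskmap[r]'hr) := by
    rw [PySem.List.pyGet?_natCast, List.getElem?_eq_getElem hr]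
  have hcs : ∀ c ∈ (riskmap[r]'hr).toList, c ∈ vlist :=
    hpre (riskmap[r]'hr) (List.getElem_mem hr)
  simp only [aRow, PySem.Int.mod_natCast, PySem.Int.floordiv_natCast, hmod, hdiv, hget,
    Option.getD_some]
  simp only [shiftLine, toList_wideRow, String.toList_ofList]
  refine congrArg String.ofList ?_
  simp only [List.map_append, List.map_map, List.append_nil, Function.comp_def]
  have hc : ∀ (kk : Int), (riskmap[r]'hr).toList.map (fun c => shiftChar (shiftChar c kk) (t : Int))
      = (riskmap[r]'hr).toList.map (fun c => shiftChar c ((t : Int) + kk)) :=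
    fun kk => List.map_congr_left (fun c hcmem => shiftChar_comp kk (t : Int) (hcs c hcmem))
  rw [hc 0, hc 1, hc 2, hc 3, hc 4]
  simp [List.append_assoc]

-- ===== VERDICT (by name: the statement is the Claim_ definition above) =====
theorem increaseMap_spec : Claim_equal_increaseMap := by
  intro riskmap _ hpre0
  have hpre : ∀ s ∈ riskmap, ∀ c ∈ s.toList, c ∈ vlist := by
    simpa [Pre_increaseMap, List.all_eq_true] using hpre0
  unfold Spec_increaseMap
  rcases Nat.eq_zero_or_pos riskmap.length with hn | hn
  · rw [List.length_eq_zero_iff.mp hn]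
    decide
  have hcast : (riskmap.length : Int) * 5 = ((riskmap.length * 5 : Nat) : Int) := by push_cast; ring
  rw [increaseMap_eq_map, hcast, PySem.List.pyRange_zero_natCast, range_five]
  simp only [List.map_append, List.map_map, Function.comp_def]
  have h5 : PySem.List.pyRange 0 5 1 = [0, 1, 2, 3, 4] := by decide
  simp only [increaseMap_alt, h5, List.flatMap_cons, List.flatMap_nil, List.append_nil]
  have e0 := block_eq riskmap hpre hn 0
  have e1 := block_eq riskmap hpre hn 1
  have e2 := block_eq riskmap hpre hn 2
  have e3 := block_eq riskmap hpre hn 3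
  have e4 := block_eq riskmap hpre hn 4
  simp only [Nat.cast_ofNat, Nat.cast_one, Nat.cast_zero] at e0 e1 e2 e3 e4
  rw [e0, e1, e2, e3, e4]
  simp [List.append_assoc]
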